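-- pv_equiv track=rewrite | github.com/MohiuddinSohel/Leetcoding | amazonOAPreparation/OA.py | reduandant_string
-- ===== SOURCE A (Python) =====
-- from collections import defaultdict, Counter, deque
--
-- def reduandant_string(word, a, b):
--     # https://leetcode.com/discuss/interview-question/5478303/Amazon-OA/
--     dic = defaultdict(int)
--     dic[0] = 1
--     vowel_cnt, consonant_cnt = 0, 0
--     res = 0
--     for c in word:
--         if c in 'aeiou':
--            vowel_cnt += 1
--         else:
--            consonant_cnt += 1
--         curr = (a - 1) * vowel_cnt + (b - 1) * consonant_cnt
--         res += dic[curr]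
--         dic[curr] += 1
--     return res
-- ===== SOURCE B (Python) =====
-- def reduandant_string(word, a, b):
--     # Count nonempty substrings with zero weighted sum by scanning each suffix.
--     res = 0
--     suffix = word
--     while suffix:
--         s = 0
--         for ch in suffix:
--             s += (a - 1) if ch in 'aeiou' else (b - 1)
--             if s == 0:
--                 res += 1
--         suffix = suffix[1:]
--     return res
-- ===== Notes on version B (the rewrite author's own statement) =====
-- stated objective: alternative
-- what changed: Replaced A's single pass with a prefix-sum hashmap (defaultdict counting equal weighted prefix sums) by a direct nested scan: for each suffix of the word, a running weighted sum counts every substring summing to zero.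
import Mathlib
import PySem

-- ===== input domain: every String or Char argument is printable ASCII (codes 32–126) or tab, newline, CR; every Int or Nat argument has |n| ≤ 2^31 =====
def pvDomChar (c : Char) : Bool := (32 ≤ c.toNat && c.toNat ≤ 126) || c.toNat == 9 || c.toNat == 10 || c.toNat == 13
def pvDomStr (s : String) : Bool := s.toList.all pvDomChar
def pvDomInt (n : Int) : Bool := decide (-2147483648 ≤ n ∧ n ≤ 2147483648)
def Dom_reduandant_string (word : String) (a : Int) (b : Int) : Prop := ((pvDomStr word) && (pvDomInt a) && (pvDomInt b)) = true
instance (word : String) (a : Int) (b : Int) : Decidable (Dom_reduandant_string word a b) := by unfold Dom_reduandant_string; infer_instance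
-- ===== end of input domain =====

-- B replaces A's prefix-sum hashmap single pass (O(n)) by a plain nested scan of every
-- suffix (O(n^2)); same return value everywhere (objective: alternative, not faster).

-- ===== PORT A =====
-- one loop step of A: classify the char, update the weighted prefix sum, count via the dict
def pvAStep (a b : Int) (st : PySem.Dict Int Int × Int × Int × Int) (c : Char) :
    PySem.Dict Int Int × Int × Int × Int :=
  match st with
  | (dic, vowel_cnt, consonant_cnt, res) =>
    let (vowel_cnt, consonant_cnt) :=
      if "aeiou".toList.contains c then (vowel_cnt + 1, consonant_cnt)
      else (vowel_cnt, consonant_cnt + 1)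
    let curr := (a - 1) * vowel_cnt + (b - 1) * consonant_cnt
    let cnt := dic.getD curr 0            -- defaultdict(int) read
    let res := res + cnt
    let dic := dic.insert curr (cnt + 1)  -- dic[curr] += 1
    (dic, vowel_cnt, consonant_cnt, res)

def reduandant_string (word : String) (a : Int) (b : Int) : Int :=
  (word.toList.foldl (pvAStep a b)
    ((PySem.Dict.empty).insert 0 1, 0, 0, 0)).2.2.2

-- ===== PORT B =====
-- inner for-loop of B: running weighted sum over one suffix, counting the zeros
def pvInner (a b : Int) (xs : List Char) : Int :=
  (xs.foldl (fun (st : Int × Int) ch =>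
      let s := st.1 + (if "aeiou".toList.contains ch then a - 1 else b - 1)
      (s, if s = 0 then st.2 + 1 else st.2)) (0, 0)).2

-- outer while-loop of B: scan each suffix in turn, accumulating res
def pvOuter (a b : Int) : List Char → Int
  | [] => 0
  | c :: t => pvInner a b (c :: t) + pvOuter a b t

def reduandant_string_alt (word : String) (a : Int) (b : Int) : Int :=
  pvOuter a b word.toList

-- ===== PRECONDITION & SPEC =====
def Spec_reduandant_string (word : String) (a : Int) (b : Int) (out : Int) : Prop := out = reduandant_string_alt word a b
instance (word : String) (a : Int) (b : Int) (out : Int) : Decidable (Spec_reduandant_string word a b out) := by unfold Spec_reduandant_string; infer_instance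

-- ===== CLAIM (what is proved, stated in full; the proofs are below) =====
def Claim_equal_reduandant_string : Prop := ∀ (word : String) (a : Int) (b : Int), Dom_reduandant_string word a b → Spec_reduandant_string word a b (reduandant_string word a b)

-- ===== LEMMAS AND PROOFS =====

-- weight of one character
def pvW (a b : Int) (c : Char) : Int :=
  if "aeiou".toList.contains c then a - 1 else b - 1

-- weighted prefix sums of xs starting from s (one entry per character)
def pvPS (a b : Int) (s : Int) : List Char → List Int
  | [] => []
  | c :: t => (s + pvW a b c) :: pvPS a b (s + pvW a b c) t

-- "pair count, counting forward into the tail"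
def pvPC : List Int → Int
  | [] => 0
  | x :: t => (t.count x : Int) + pvPC t

-- "pair count, counting back into the already-seen list" (shape of A's dict loop)
def pvCF : List Int → List Int → Int
  | _, [] => 0
  | seen, x :: t => (seen.count x : Int) + pvCF (x :: seen) t

-- B's inner loop counts the zeros among the prefix sums of the suffix
theorem pvInner_eq_count (a b : Int) :
    ∀ (xs : List Char) (s r : Int),
      (xs.foldl (fun (st : Int × Int) ch =>
        let s := st.1 + (if "aeiou".toList.contains ch then a - 1 else b - 1)
        (s, if s = 0 then st.2 + 1 else st.2)) (s, r)).2
      = r + ((pvPS a b s xs).count 0 : Int) := by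
  intro xs
  induction xs with
  | nil => intro s r; simp [pvPS]
  | cons c t ih =>
    intro s r
    rw [List.foldl_cons]
    show (List.foldl (fun (st : Int × Int) ch =>
        let s := st.1 + (if "aeiou".toList.contains ch then a - 1 else b - 1)
        (s, if s = 0 then st.2 + 1 else st.2))
        (s + pvW a b c, if s + pvW a b c = 0 then r + 1 else r) t).2
      = r + (((pvPS a b s (c :: t)).count 0 : Nat) : Int)
    rw [ih]
    show (if s + pvW a b c = 0 then r + 1 else r)
        + (((pvPS a b (s + pvW a b c) t).count 0 : Nat) : Int)
      = r + (((pvPS a b s (c :: t)).count 0 : Nat) : Int)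
    rw [show pvPS a b s (c :: t) = (s + pvW a b c) :: pvPS a b (s + pvW a b c) t from rfl]
    rw [List.count_cons]
    by_cases h : s + pvW a b c = 0
    · rw [if_pos h, if_pos (by simpa [beq_iff_eq] using h)]; push_cast; ring
    · rw [if_neg h, if_neg (by simpa [beq_iff_eq] using h)]; push_cast; ring

-- shift invariance of counting in the prefix-sum list
theorem pvPS_count_shift (a b : Int) :
    ∀ (t : List Char) (s u x : Int),
      (pvPS a b (s + u) t).count (s + x) = (pvPS a b u t).count x := by
  intro t
  induction t with
  | nil => intro s u x; simp [pvPS]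
  | cons c t ih =>
    intro s u x
    have h1 : s + u + pvW a b c = s + (u + pvW a b c) := by ring
    simp only [pvPS, h1, List.count_cons, ih, beq_iff_eq]
    have h2 : (s + (u + pvW a b c) = s + x) ↔ (u + pvW a b c = x) := by omega
    simp [h2]

-- B's value equals the backward pair count of the prefix-sum list
theorem pvOuter_eq_pc (a b : Int) :
    ∀ (xs : List Char) (s : Int), pvPC (s :: pvPS a b s xs) = pvOuter a b xs := by
  intro xs
  induction xs with
  | nil => intro s; simp [pvPS, pvPC, pvOuter]
  | cons c t ih =>
    intro s
    have hInner : pvInner a b (c :: t) = ((pvPS a b 0 (c :: t)).count 0 : Int) := by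
      have := pvInner_eq_count a b (c :: t) 0 0
      simpa [pvInner] using this
    have hshift : (pvPS a b (s + pvW a b c) t).count s = (pvPS a b (pvW a b c) t).count 0 := by
      have h := pvPS_count_shift a b t s (pvW a b c) 0
      simpa using h
    have hcnt : (((s + pvW a b c) :: pvPS a b (s + pvW a b c) t).count s : Int)
        = ((pvPS a b 0 (c :: t)).count 0 : Int) := by
      rw [show pvPS a b 0 (c :: t) = (0 + pvW a b c) :: pvPS a b (0 + pvW a b c) t from rfl]
      simp only [List.count_cons, beq_iff_eq, zero_add, hshift]
      by_cases h0 : pvW a b c = 0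
      · simp [h0]
      · have h1 : ¬ (s + pvW a b c = s) := by omega
        simp [h0, h1]
    rw [show pvPC (s :: pvPS a b s (c :: t))
        = ((((s + pvW a b c) :: pvPS a b (s + pvW a b c) t).count s : Nat) : Int)
          + pvPC ((s + pvW a b c) :: pvPS a b (s + pvW a b c) t) from rfl]
    rw [ih (s + pvW a b c), hcnt, ← hInner]
    rfl

-- counting z through a whole list, one element at a time
theorem pvMapSingle :
    ∀ (l : List Int) (z : Int),
      (l.map (fun y => (([z] : List Int).count y : Int))).sum = (l.count z : Int) := by
  intro l
  induction l with
  | nil => intro z; simp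
  | cons x t ih =>
    intro z
    rw [List.map_cons, List.sum_cons, ih, List.count_cons]
    by_cases h : z = x
    · subst h
      simp
      ring
    · have h' : ¬ (x = z) := fun hh => h hh.symm
      simp [h, h']

-- peeling one element off the seen-list of pvCF
theorem pvCountConsSum (x : Int) (seen : List Int) :
    ∀ (t : List Int),
      (t.map (fun y => (((x :: seen).count y : Nat) : Int))).sum
        = (t.map (fun y => ((seen.count y : Nat) : Int))).sum
          + (t.map (fun y => ((([x] : List Int).count y : Nat) : Int))).sum := by
  intro t
  induction t with
  | nil => simp
  | cons z zs ih =>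
    rw [List.map_cons, List.sum_cons, List.map_cons, List.sum_cons, List.map_cons,
      List.sum_cons, ih]
    have hhead : (((x :: seen).count z : Nat) : Int)
        = ((seen.count z : Nat) : Int) + ((([x] : List Int).count z : Nat) : Int) := by
      push_cast [List.count_cons, List.count_nil]
      ring
    rw [hhead]
    ring

theorem pvCF_seen (l : List Int) :
    ∀ (seen : List Int),
      pvCF seen l = (l.map (fun y => ((seen.count y : Nat) : Int))).sum + pvCF [] l := by
  induction l with
  | nil => intro seen; simp [pvCF]
  | cons x t ih =>
    intro seen
    simp only [pvCF, List.map_cons, List.sum_cons]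
    rw [ih (x :: seen), ih [x], pvCountConsSum x seen t]
    rw [show ((([] : List Int).count x : Nat) : Int) = 0 by simp]
    ring

-- forward pair count = backward pair count
theorem pvCF_eq_pc : ∀ (l : List Int), pvCF [] l = pvPC l := by
  intro l
  induction l with
  | nil => rfl
  | cons x t ih =>
    simp only [pvCF, pvPC, List.count_nil]
    rw [pvCF_seen t [x], ih, pvMapSingle]
    push_cast; ring

-- A's dict-based loop computes pvCF over the prefix sums
theorem pvA_loop (a b : Int) :
    ∀ (xs : List Char) (dic : PySem.Dict Int Int) (seen : List Int)
      (v cc res : Int),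
      (∀ k : Int, dic.getD k 0 = (seen.count k : Int)) →
      (xs.foldl (pvAStep a b) (dic, v, cc, res)).2.2.2
        = res + pvCF seen (pvPS a b ((a - 1) * v + (b - 1) * cc) xs) := by
  intro xs
  induction xs with
  | nil => intro dic seen v cc res _; simp [pvCF, pvPS]
  | cons c t ih =>
    intro dic seen v cc res hd
    by_cases hc : "aeiou".toList.contains c
    · have hw : pvW a b c = a - 1 := by unfold pvW; rw [if_pos hc]
      have hcurr : (a - 1) * (v + 1) + (b - 1) * cc
          = ((a - 1) * v + (b - 1) * cc) + pvW a b c := by rw [hw]; ring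
      have hstep : pvAStep a b (dic, v, cc, res) c
          = (dic.insert ((a - 1) * (v + 1) + (b - 1) * cc)
               (dic.getD ((a - 1) * (v + 1) + (b - 1) * cc) 0 + 1), v + 1, cc,
             res + dic.getD ((a - 1) * (v + 1) + (b - 1) * cc) 0) := by
        simp only [pvAStep]
        rw [if_pos hc]
      rw [hcurr] at hstep
      set s := (a - 1) * v + (b - 1) * cc with hs
      have hd' : ∀ k : Int,
          (dic.insert (s + pvW a b c) (dic.getD (s + pvW a b c) 0 + 1)).getD k 0
            = ((((s + pvW a b c) :: seen).count k : Nat) : Int) := by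
        intro k
        rw [PySem.Dict.getD_insert]
        by_cases hk : k = s + pvW a b c
        · simp [hk, hd]
        · have hne : ¬ (s + pvW a b c = k) := fun hh => hk hh.symm
          simp [hk, hd, hne]
      calc (List.foldl (pvAStep a b) (pvAStep a b (dic, v, cc, res) c) t).2.2.2
          = (List.foldl (pvAStep a b)
              (dic.insert (s + pvW a b c) (dic.getD (s + pvW a b c) 0 + 1), v + 1, cc,
               res + dic.getD (s + pvW a b c) 0) t).2.2.2 := by rw [hstep]
        _ = (res + dic.getD (s + pvW a b c) 0)
              + pvCF ((s + pvW a b c) :: seen)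
                  (pvPS a b ((a - 1) * (v + 1) + (b - 1) * cc) t) := ih _ _ _ _ _ hd'
        _ = res + pvCF seen (pvPS a b s (c :: t)) := by
              rw [show pvPS a b ((a - 1) * (v + 1) + (b - 1) * cc) t
                    = pvPS a b (s + pvW a b c) t by rw [hcurr],
                show pvPS a b s (c :: t) = (s + pvW a b c) :: pvPS a b (s + pvW a b c) t from rfl,
                show pvCF seen ((s + pvW a b c) :: pvPS a b (s + pvW a b c) t)
                  = (((seen.count (s + pvW a b c) : Nat)) : Int)
                    + pvCF ((s + pvW a b c) :: seen) (pvPS a b (s + pvW a b c) t) from rfl,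
                hd]
              ring
    · have hw : pvW a b c = b - 1 := by unfold pvW; rw [if_neg hc]
      have hcurr : (a - 1) * v + (b - 1) * (cc + 1)
          = ((a - 1) * v + (b - 1) * cc) + pvW a b c := by rw [hw]; ring
      have hstep : pvAStep a b (dic, v, cc, res) c
          = (dic.insert ((a - 1) * v + (b - 1) * (cc + 1))
               (dic.getD ((a - 1) * v + (b - 1) * (cc + 1)) 0 + 1), v, cc + 1,
             res + dic.getD ((a - 1) * v + (b - 1) * (cc + 1)) 0) := by
        simp only [pvAStep]
        rw [if_neg hc]
      rw [hcurr] at hstep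
      set s := (a - 1) * v + (b - 1) * cc with hs
      have hd' : ∀ k : Int,
          (dic.insert (s + pvW a b c) (dic.getD (s + pvW a b c) 0 + 1)).getD k 0
            = ((((s + pvW a b c) :: seen).count k : Nat) : Int) := by
        intro k
        rw [PySem.Dict.getD_insert]
        by_cases hk : k = s + pvW a b c
        · simp [hk, hd]
        · have hne : ¬ (s + pvW a b c = k) := fun hh => hk hh.symm
          simp [hk, hd, hne]
      calc (List.foldl (pvAStep a b) (pvAStep a b (dic, v, cc, res) c) t).2.2.2
          = (List.foldl (pvAStep a b)
              (dic.insert (s + pvW a b c) (dic.getD (s + pvW a b c) 0 + 1), v, cc + 1,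
               res + dic.getD (s + pvW a b c) 0) t).2.2.2 := by rw [hstep]
        _ = (res + dic.getD (s + pvW a b c) 0)
              + pvCF ((s + pvW a b c) :: seen)
                  (pvPS a b ((a - 1) * v + (b - 1) * (cc + 1)) t) := ih _ _ _ _ _ hd'
        _ = res + pvCF seen (pvPS a b s (c :: t)) := by
              rw [show pvPS a b ((a - 1) * v + (b - 1) * (cc + 1)) t
                    = pvPS a b (s + pvW a b c) t by rw [hcurr],
                show pvPS a b s (c :: t) = (s + pvW a b c) :: pvPS a b (s + pvW a b c) t from rfl,
                show pvCF seen ((s + pvW a b c) :: pvPS a b (s + pvW a b c) t)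
                  = (((seen.count (s + pvW a b c) : Nat)) : Int)
                    + pvCF ((s + pvW a b c) :: seen) (pvPS a b (s + pvW a b c) t) from rfl,
                hd]
              ring

-- ===== VERDICT (by name: the statement is the Claim_ definition above) =====
theorem reduandant_string_spec : Claim_equal_reduandant_string := by
  intro word a b _
  unfold Spec_reduandant_string reduandant_string reduandant_string_alt
  have hd0 : ∀ k : Int,
      ((PySem.Dict.empty : PySem.Dict Int Int).insert 0 1).getD k 0
        = ((([(0 : Int)] : List Int).count k : Nat) : Int) := by
    intro k
    rw [PySem.Dict.getD_insert]
    by_cases hk : k = 0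
    · simp [hk]
    · have : ¬ ((0 : Int) = k) := fun h => hk h.symm
      simp [hk, this, PySem.Dict.getD_empty]
  rw [pvA_loop a b word.toList _ [(0 : Int)] 0 0 0 hd0]
  have h0 : (a - 1) * 0 + (b - 1) * 0 = 0 := by ring
  rw [h0, zero_add]
  rw [pvCF_seen, pvCF_eq_pc, pvMapSingle, ← pvOuter_eq_pc a b word.toList 0]
  simp [pvPC]
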